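-- pv_equiv track=rewrite | github.com/vxda7/pycharm | Algorithm 190822 linklist/flyhangle.py | mosa
-- ===== SOURCE A (Python) =====
-- def mosa(N, M, space):
--     best = 0
--     for i in range(N-M+1):
--         for j in range(N-M+1):
--             catch = 0
--             for k in range(M**2):   # k//M  k%M
--                 if (k//M + k%M)%2 == 1:
--                     catch += space[i + k//M][j + k%M]
--             if catch > best:
--                 best = catch
--     return best
-- ===== SOURCE B (Python) =====
-- def mosa(N, M, space):
--     if M > N:
--         return 0
--     # 2D prefix sums, one table per cell parity of (row+col)
--     prev0 = [0] * (N + 1)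
--     prev1 = [0] * (N + 1)
--     rows0 = [prev0]
--     rows1 = [prev1]
--     for r in range(N):
--         row = space[r]
--         run0 = 0
--         run1 = 0
--         cur0 = [0]
--         cur1 = [0]
--         for c in range(N):
--             if (r + c) % 2 == 1:
--                 run1 += row[c]
--             else:
--                 run0 += row[c]
--             cur0.append(prev0[c + 1] + run0)
--             cur1.append(prev1[c + 1] + run1)
--         rows0.append(cur0)
--         rows1.append(cur1)
--         prev0 = cur0
--         prev1 = cur1
--     best = 0
--     for i in range(N - M + 1):
--         for j in range(N - M + 1):
--             # A counts window cells with odd (local) offset parity a+b;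
--             # absolute parity of those cells is (i+j+1) % 2
--             P = rows1 if (i + j) % 2 == 0 else rows0
--             cur = P[i + M][j + M] - P[i][j + M] - P[i + M][j] + P[i][j]
--             if cur > best:
--                 best = cur
--     return best
-- ===== Notes on version B (the rewrite author's own statement) =====
-- stated objective: alternative
-- what changed: A rescans all M*M cells of every window; B precomputes two 2D prefix-sum tables (one per (row+col) parity of the cells) in one pass and answers each window with an inclusion-exclusion query on the table matching the window's local odd-offset parity.
-- outside the precondition, e.g. on mosa(2, 0, []): A returns 0, B raises IndexError
import Mathlib
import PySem

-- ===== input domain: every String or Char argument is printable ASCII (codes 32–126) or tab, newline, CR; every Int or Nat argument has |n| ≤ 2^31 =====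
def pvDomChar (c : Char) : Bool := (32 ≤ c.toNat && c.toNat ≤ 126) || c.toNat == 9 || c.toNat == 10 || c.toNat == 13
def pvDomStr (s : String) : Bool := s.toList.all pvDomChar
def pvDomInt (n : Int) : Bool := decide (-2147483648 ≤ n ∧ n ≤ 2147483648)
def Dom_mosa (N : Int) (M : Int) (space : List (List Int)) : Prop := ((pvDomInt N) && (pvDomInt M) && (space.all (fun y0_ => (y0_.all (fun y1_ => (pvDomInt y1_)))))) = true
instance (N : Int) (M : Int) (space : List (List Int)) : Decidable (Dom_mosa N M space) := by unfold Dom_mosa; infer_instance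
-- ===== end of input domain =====

-- B precomputes two parity-split 2D prefix-sum tables in one pass over the grid and
-- answers each window with a constant number of table lookups instead of A's per-window rescan.

-- ===== PORT A =====
def mosa (N : Int) (M : Int) (space : List (List Int)) : Int :=
  (PySem.List.pyRange 0 (N - M + 1) 1).foldl (fun best i =>
    (PySem.List.pyRange 0 (N - M + 1) 1).foldl (fun best j =>
      let c :=
        (PySem.List.pyRange 0 (M ^ 2) 1).foldl (fun c k =>
          if PySem.Int.mod (PySem.Int.floordiv k M + PySem.Int.mod k M) 2 == 1 then
            c + PySem.List.pyGetD
                  (PySem.List.pyGetD space (i + PySem.Int.floordiv k M) [])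
                  (j + PySem.Int.mod k M) 0
          else c) 0
      if c > best then c else best) best) 0

-- ===== PORT B =====
-- body of Source B's inner (column) loop: state ((cur0, run0), (cur1, run1))
def altInnerStep (r : Int) (row prev0 prev1 : List Int)
    (p : (List Int × Int) × (List Int × Int)) (c : Int) :
    (List Int × Int) × (List Int × Int) :=
  let run0 := if PySem.Int.mod (r + c) 2 == 1 then p.1.2
              else p.1.2 + PySem.List.pyGetD row c 0
  let run1 := if PySem.Int.mod (r + c) 2 == 1 then p.2.2 + PySem.List.pyGetD row c 0
              else p.2.2
  ((p.1.1 ++ [PySem.List.pyGetD prev0 (c + 1) 0 + run0], run0),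
   (p.2.1 ++ [PySem.List.pyGetD prev1 (c + 1) 0 + run1], run1))

-- body of Source B's row loop: state ((rows0, prev0), (rows1, prev1))
def altOuterStep (space : List (List Int)) (N : Int)
    (st : (List (List Int) × List Int) × (List (List Int) × List Int)) (r : Int) :
    (List (List Int) × List Int) × (List (List Int) × List Int) :=
  let row := PySem.List.pyGetD space r []
  let p := (PySem.List.pyRange 0 N 1).foldl (altInnerStep r row st.1.2 st.2.2)
    (([0], 0), ([0], 0))
  ((st.1.1 ++ [p.1.1], p.1.1), (st.2.1 ++ [p.2.1], p.2.1))

def mosa_alt (N : Int) (M : Int) (space : List (List Int)) : Int :=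
  if M > N then 0
  else
    let prev0 : List Int := List.replicate (N + 1).toNat 0
    let prev1 : List Int := List.replicate (N + 1).toNat 0
    let st := (PySem.List.pyRange 0 N 1).foldl (altOuterStep space N)
      (([prev0], prev0), ([prev1], prev1))
    let rows0 := st.1.1
    let rows1 := st.2.1
    (PySem.List.pyRange 0 (N - M + 1) 1).foldl (fun best i =>
      (PySem.List.pyRange 0 (N - M + 1) 1).foldl (fun best j =>
        let P := if PySem.Int.mod (i + j) 2 == 0 then rows1 else rows0
        let cur := PySem.List.pyGetD (PySem.List.pyGetD P (i + M) []) (j + M) 0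
                 - PySem.List.pyGetD (PySem.List.pyGetD P i []) (j + M) 0
                 - PySem.List.pyGetD (PySem.List.pyGetD P (i + M) []) j 0
                 + PySem.List.pyGetD (PySem.List.pyGetD P i []) j 0
        if cur > best then cur else best) best) 0

-- ===== PRECONDITION & SPEC =====
-- Pre_ excludes negative M, and M = 0 over a grid smaller than N x N (A's empty inner
-- loop then returns 0 without ever touching the grid, an accident of its loop bounds, while
-- B's prefix-sum build would index the missing grid); for 0 ≤ M ≤ N it admits the N x N grids.
def Pre_mosa (N : Int) (M : Int) (space : List (List Int)) : Prop :=
  (0 ≤ M ∧ M ≤ N ∧ N ≤ (space.length : Int) ∧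
    ∀ row ∈ space.take N.toNat, N ≤ (row.length : Int)) ∨
  (0 ≤ M ∧ N < M)
instance (N : Int) (M : Int) (space : List (List Int)) : Decidable (Pre_mosa N M space) := by
  unfold Pre_mosa; infer_instance
def pvWitness_mosa : Int × Int × List (List Int) := (2, 1, [[0, 5], [7, 1]])
def Spec_mosa (N : Int) (M : Int) (space : List (List Int)) (out : Int) : Prop := out = mosa_alt N M space
instance (N : Int) (M : Int) (space : List (List Int)) (out : Int) : Decidable (Spec_mosa N M space out) := by unfold Spec_mosa; infer_instance

-- ===== CLAIM (what is proved, stated in full; the proofs are below) =====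
def Claim_equal_mosa : Prop := ∀ (N : Int) (M : Int) (space : List (List Int)), Dom_mosa N M space → Pre_mosa N M space → Spec_mosa N M space (mosa N M space)

-- ===== LEMMAS AND PROOFS =====

-- masked cell value, row prefix, rectangle prefix and window sums used to
-- characterise both programs
def cellN (space : List (List Int)) (x y : Nat) : Int := (space.getD x []).getD y 0

def gP (space : List (List Int)) (p x y : Nat) : Int :=
  if (x + y) % 2 = p then cellN space x y else 0

def rpP (space : List (List Int)) (p x c : Nat) : Int :=
  ((List.range c).map (gP space p x)).sum

def rsP (space : List (List Int)) (p r c : Nat) : Int :=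
  ((List.range r).map (fun x => rpP space p x c)).sum

def winP (space : List (List Int)) (p i j m : Nat) : Int :=
  ((List.range m).map (fun a => ((List.range m).map (fun b => gP space p (i + a) (j + b))).sum)).sum

def tableSpec (space : List (List Int)) (n r : Nat) :
    (List (List Int) × List Int) × (List (List Int) × List Int) :=
  (((List.range (r + 1)).map (fun x => (List.range (n + 1)).map (rsP space 0 x)),
      (List.range (n + 1)).map (rsP space 0 r)),
   ((List.range (r + 1)).map (fun x => (List.range (n + 1)).map (rsP space 1 x)),
      (List.range (n + 1)).map (rsP space 1 r)))

def rowSpec (space : List (List Int)) (r c : Nat) :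
    (List Int × Int) × (List Int × Int) :=
  (((List.range (c + 1)).map (rsP space 0 (r + 1)), rpP space 0 r c),
   ((List.range (c + 1)).map (rsP space 1 (r + 1)), rpP space 1 r c))

lemma foldl_ite_add_nat (q : Int → Bool) (f : Int → Int) :
    ∀ (l : List Nat) (init : Int),
      (l.map (fun (k : Nat) => (k : Int))).foldl (fun c k => if q k then c + f k else c) init
        = init + (l.map (fun (k : Nat) => if q (k : Int) then f (k : Int) else 0)).sum := by
  intro l
  induction l with
  | nil => simp
  | cons a t ih =>
    intro init
    by_cases h : q (a : Int) <;> simp [h, ih] <;> ring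

lemma foldl_cast_ite_add (n : Nat) (q : Int → Bool) (f : Int → Int) (init : Int) :
    (PySem.List.pyRange 0 (n : Int) 1).foldl (fun c k => if q k then c + f k else c) init
      = init + ((List.range n).map (fun (k : Nat) => if q (k : Int) then f (k : Int) else 0)).sum := by
  rw [PySem.List.pyRange_one]
  simp only [Int.sub_zero, Int.toNat_natCast, zero_add]
  exact foldl_ite_add_nat q f (List.range n) init

lemma foldl_range_inv {σ : Type} (n : Nat) (F : σ → Nat → σ) (inv : Nat → σ) (s0 : σ)
    (h0 : s0 = inv 0) (hstep : ∀ c, c < n → F (inv c) c = inv (c + 1)) :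
    (List.range n).foldl F s0 = inv n := by
  subst h0
  induction n with
  | zero => simp
  | succ n ih =>
    rw [List.range_succ, List.foldl_append, ih (fun c hc => hstep c (by omega))]
    simpa using hstep n (by omega)

lemma foldl_cast_inv {σ : Type} (n : Nat) (F : σ → Int → σ) (inv : Nat → σ) (s0 : σ)
    (h0 : s0 = inv 0) (hstep : ∀ c : Nat, c < n → F (inv c) (c : Int) = inv (c + 1)) :
    (PySem.List.pyRange 0 (n : Int) 1).foldl F s0 = inv n := by
  rw [PySem.List.pyRange_one]
  simp only [Int.sub_zero, Int.toNat_natCast, zero_add]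
  rw [List.foldl_map]
  exact foldl_range_inv n _ inv s0 h0 hstep

lemma sum_map_sub {α : Type} (l : List α) (f g : α → Int) :
    (l.map (fun x => f x - g x)).sum = (l.map f).sum - (l.map g).sum := by
  induction l with
  | nil => simp
  | cons a t ih => simp [ih]; ring

lemma sum_range_divmod (m : Nat) (hm : 0 < m) (f : Nat → Nat → Int) :
    ∀ A : Nat, ((List.range (A * m)).map (fun k => f (k / m) (k % m))).sum
      = ((List.range A).map (fun a => ((List.range m).map (f a)).sum)).sum := by
  intro A
  induction A with
  | zero => simp
  | succ A ih =>
    rw [Nat.succ_mul, List.range_add, List.map_append, List.sum_append, ih,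
      List.range_succ, List.map_append, List.sum_append]
    congr 1
    have hmap : List.map ((fun k => f (k / m) (k % m)) ∘ fun x => A * m + x) (List.range m)
        = List.map (f A) (List.range m) := by
      refine List.map_congr_left fun b hb => ?_
      have hb' : b < m := List.mem_range.mp hb
      simp only [Function.comp]
      rw [show A * m + b = m * A + b by ring, Nat.mul_add_div hm, Nat.mul_add_mod,
        Nat.div_eq_of_lt hb', Nat.mod_eq_of_lt hb']
      norm_num
    rw [List.map_map, hmap]
    simp

lemma mod_two_cast (a : Nat) : PySem.Int.mod (a : Int) 2 = ((a % 2 : Nat) : Int) := by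
  have h := PySem.Int.mod_natCast a 2
  simpa using h

lemma parity_cast (r c : Nat) :
    (PySem.Int.mod ((r : Int) + (c : Int)) 2 == 1) = true ↔ (r + c) % 2 = 1 := by
  rw [show ((r : Int) + (c : Int)) = ((r + c : Nat) : Int) by push_cast; ring, mod_two_cast]
  simp only [beq_iff_eq]
  constructor <;> intro h <;> omega

lemma getD_map_range' (k t : Nat) (f : Nat → Int) (d : Int) (h : t < k) :
    ((List.range k).map f).getD t d = f t := by
  simp [List.getD_eq_getElem?_getD, h]

lemma rpP_succ (space : List (List Int)) (p x c : Nat) :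
    rpP space p x (c + 1) = rpP space p x c + gP space p x c := by
  simp [rpP, List.range_succ]

lemma rsP_succ (space : List (List Int)) (p r c : Nat) :
    rsP space p (r + 1) c = rsP space p r c + rpP space p r c := by
  simp [rsP, List.range_succ]

lemma rsP_zero (space : List (List Int)) (p c : Nat) : rsP space p 0 c = 0 := by
  simp [rsP]

lemma rsP_c0 (space : List (List Int)) (p r : Nat) : rsP space p r 0 = 0 := by
  simp [rsP, rpP]

lemma map_rsP_zero (space : List (List Int)) (p k : Nat) :
    (List.range k).map (rsP space p 0) = List.replicate k 0 := by
  calc (List.range k).map (rsP space p 0)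
      = (List.range k).map (fun _ => (0 : Int)) :=
        List.map_congr_left fun c _ => rsP_zero space p c
    _ = List.replicate k 0 := by simp

lemma rsP_add (space : List (List Int)) (p i a c : Nat) :
    rsP space p (i + a) c
      = rsP space p i c + ((List.range a).map (fun t => rpP space p (i + t) c)).sum := by
  rw [rsP, List.range_add, List.map_append, List.sum_append, List.map_map]
  rfl

lemma rpP_add (space : List (List Int)) (p x j b : Nat) :
    rpP space p x (j + b)
      = rpP space p x j + ((List.range b).map (fun t => gP space p x (j + t))).sum := by
  rw [rpP, List.range_add, List.map_append, List.sum_append, List.map_map]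
  rfl

lemma win_eq (space : List (List Int)) (p i j m : Nat) :
    rsP space p (i + m) (j + m) - rsP space p i (j + m) - rsP space p (i + m) j + rsP space p i j
      = winP space p i j m := by
  have hsub : ((List.range m).map (fun t => rpP space p (i + t) (j + m))).sum
      - ((List.range m).map (fun t => rpP space p (i + t) j)).sum = winP space p i j m := by
    rw [← sum_map_sub]
    refine congrArg _ (List.map_congr_left fun a _ => ?_)
    rw [rpP_add space p (i + a) j m]
    ring
  rw [rsP_add space p i m (j + m), rsP_add space p i m j, ← hsub]
  ring

lemma cell_cast (space : List (List Int)) (x y : Nat) :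
    PySem.List.pyGetD (PySem.List.pyGetD space (x : Int) []) (y : Int) 0 = cellN space x y := by
  rw [PySem.List.pyGetD_natCast, PySem.List.pyGetD_natCast]
  rfl

lemma catchA_eq (space : List (List Int)) (m iN jN : Nat) :
    (PySem.List.pyRange 0 ((m : Int) ^ 2) 1).foldl (fun c k =>
        if PySem.Int.mod (PySem.Int.floordiv k (m : Int) + PySem.Int.mod k (m : Int)) 2 == 1 then
          c + PySem.List.pyGetD
                (PySem.List.pyGetD space ((iN : Int) + PySem.Int.floordiv k (m : Int)) [])
                ((jN : Int) + PySem.Int.mod k (m : Int)) 0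
        else c) 0
      = winP space ((iN + jN + 1) % 2) iN jN m := by
  rcases Nat.eq_zero_or_pos m with rfl | hm
  · rw [show (((0 : Nat) : Int)) ^ 2 = 0 by norm_num,
      PySem.List.pyRange_one_eq_nil (by norm_num)]
    simp [winP]
  have h2 : ((m : Int) ^ 2) = ((m * m : Nat) : Int) := by push_cast; ring
  rw [h2, foldl_cast_ite_add (m * m), zero_add]
  have hmap : ∀ k : Nat,
      (if PySem.Int.mod (PySem.Int.floordiv (k : Int) (m : Int) + PySem.Int.mod (k : Int) (m : Int)) 2 == 1 then
          PySem.List.pyGetD (PySem.List.pyGetD space ((iN : Int) + PySem.Int.floordiv (k : Int) (m : Int)) [])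
            ((jN : Int) + PySem.Int.mod (k : Int) (m : Int)) 0
        else 0)
      = gP space ((iN + jN + 1) % 2) (iN + k / m) (jN + k % m) := by
    intro k
    have hcell : PySem.List.pyGetD (PySem.List.pyGetD space ((iN : Int) + PySem.Int.floordiv (k : Int) (m : Int)) [])
        ((jN : Int) + PySem.Int.mod (k : Int) (m : Int)) 0 = cellN space (iN + k / m) (jN + k % m) := by
      rw [PySem.Int.floordiv_natCast, PySem.Int.mod_natCast,
        show (iN : Int) + ((k / m : Nat) : Int) = ((iN + k / m : Nat) : Int) by push_cast; ring,
        show (jN : Int) + ((k % m : Nat) : Int) = ((jN + k % m : Nat) : Int) by push_cast; ring,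
        cell_cast]
    have hcond : (PySem.Int.mod (PySem.Int.floordiv (k : Int) (m : Int) + PySem.Int.mod (k : Int) (m : Int)) 2 == 1) = true
        ↔ ((iN + k / m) + (jN + k % m)) % 2 = (iN + jN + 1) % 2 := by
      rw [PySem.Int.floordiv_natCast, PySem.Int.mod_natCast,
        show ((k / m : Nat) : Int) + ((k % m : Nat) : Int) = ((k / m + k % m : Nat) : Int) by push_cast; ring,
        mod_two_cast]
      simp only [beq_iff_eq]
      constructor <;> intro h <;> omega
    by_cases h : (PySem.Int.mod (PySem.Int.floordiv (k : Int) (m : Int) + PySem.Int.mod (k : Int) (m : Int)) 2 == 1) = true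
    · rw [if_pos h, hcell, gP, if_pos (hcond.mp h)]
    · rw [if_neg h, gP, if_neg (fun hc => h (hcond.mpr hc))]
  rw [List.map_congr_left fun k _ => hmap k]
  unfold winP
  exact sum_range_divmod m hm (fun a b => gP space ((iN + jN + 1) % 2) (iN + a) (jN + b)) m

lemma inner_eq (space : List (List Int)) (n r : Nat) :
    (PySem.List.pyRange 0 (n : Int) 1).foldl
      (altInnerStep (r : Int) (PySem.List.pyGetD space (r : Int) [])
        ((List.range (n + 1)).map (rsP space 0 r)) ((List.range (n + 1)).map (rsP space 1 r)))
      (([0], 0), ([0], 0))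
    = rowSpec space r n := by
  apply foldl_cast_inv n _ (rowSpec space r)
  · simp [rowSpec, rsP_c0, rpP, List.range_succ, List.range_zero]
  · intro c hc
    have hcell : PySem.List.pyGetD (PySem.List.pyGetD space (r : Int) []) (c : Int) 0 = cellN space r c :=
      cell_cast space r c
    have hprev : ∀ p' : Nat, PySem.List.pyGetD ((List.range (n + 1)).map (rsP space p' r)) ((c : Int) + 1) 0
        = rsP space p' r (c + 1) := by
      intro p'
      rw [show ((c : Int) + 1) = ((c + 1 : Nat) : Int) by push_cast; ring,
        PySem.List.pyGetD_natCast]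
      exact getD_map_range' (n + 1) (c + 1) _ 0 (by omega)
    have hrange : ∀ p' r' : Nat,
        (List.range (c + 1)).map (rsP space p' r') ++ [rsP space p' r' (c + 1)]
          = (List.range (c + 1 + 1)).map (rsP space p' r') := by
      intro p' r'
      rw [List.range_succ (n := c + 1), List.map_append]
      rfl
    by_cases h : (r + c) % 2 = 1
    · have hb : (PySem.Int.mod ((r : Int) + (c : Int)) 2 == 1) = true := (parity_cast r c).mpr h
      simp only [altInnerStep, hb, if_true, hcell, hprev]
      unfold rowSpec
      refine congrArg₂ Prod.mk (congrArg₂ Prod.mk ?_ ?_) (congrArg₂ Prod.mk ?_ ?_)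
      · rw [← hrange 0 (r + 1), rsP_succ, rpP_succ, gP, if_neg (by omega), add_zero]
      · rw [rpP_succ, gP, if_neg (by omega), add_zero]
      · rw [← hrange 1 (r + 1), rsP_succ, rpP_succ, gP, if_pos (by omega)]
      · rw [rpP_succ, gP, if_pos (by omega)]
    · have hb : (PySem.Int.mod ((r : Int) + (c : Int)) 2 == 1) = false := by
        rcases Bool.eq_false_or_eq_true (PySem.Int.mod ((r : Int) + (c : Int)) 2 == 1) with ht | hf
        · exact absurd ((parity_cast r c).mp ht) h
        · exact hf
      simp only [altInnerStep, hb, Bool.false_eq_true, if_false, hcell, hprev]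
      unfold rowSpec
      refine congrArg₂ Prod.mk (congrArg₂ Prod.mk ?_ ?_) (congrArg₂ Prod.mk ?_ ?_)
      · rw [← hrange 0 (r + 1), rsP_succ, rpP_succ, gP, if_pos (by omega)]
      · rw [rpP_succ, gP, if_pos (by omega)]
      · rw [← hrange 1 (r + 1), rsP_succ, rpP_succ, gP, if_neg (by omega), add_zero]
      · rw [rpP_succ, gP, if_neg (by omega), add_zero]

lemma tables_eq (space : List (List Int)) (n : Nat) :
    (PySem.List.pyRange 0 (n : Int) 1).foldl (altOuterStep space (n : Int))
      (([List.replicate ((n : Int) + 1).toNat 0], List.replicate ((n : Int) + 1).toNat 0),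
       ([List.replicate ((n : Int) + 1).toNat 0], List.replicate ((n : Int) + 1).toNat 0))
    = tableSpec space n n := by
  apply foldl_cast_inv n _ (tableSpec space n)
  · have hrep : ((n : Int) + 1).toNat = n + 1 := by omega
    simp [tableSpec, hrep, map_rsP_zero, rsP_zero, List.replicate_succ', List.range_succ, List.range_zero]
  · intro r hr
    have hrows : ∀ p' : Nat,
        (List.range (r + 1)).map (fun x => (List.range (n + 1)).map (rsP space p' x))
            ++ [(List.range (n + 1)).map (rsP space p' (r + 1))]
          = (List.range (r + 1 + 1)).map (fun x => (List.range (n + 1)).map (rsP space p' x)) := by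
      intro p'
      rw [List.range_succ (n := r + 1), List.map_append]
      rfl
    simp only [altOuterStep, tableSpec]
    rw [inner_eq space n r]
    simp only [rowSpec, Prod.mk.injEq]
    refine ⟨⟨hrows 0, trivial⟩, hrows 1, trivial⟩

lemma parity_cast0 (r c : Nat) :
    (PySem.Int.mod ((r : Int) + (c : Int)) 2 == 0) = true ↔ (r + c) % 2 = 0 := by
  rw [show ((r : Int) + (c : Int)) = ((r + c : Nat) : Int) by push_cast; ring, mod_two_cast]
  simp only [beq_iff_eq]
  constructor <;> intro h <;> omega

lemma getD_map_range2 {α : Type} (k t : Nat) (f : Nat → α) (d : α) (h : t < k) :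
    ((List.range k).map f).getD t d = f t := by
  simp [List.getD_eq_getElem?_getD, h]

lemma lookup_eq (space : List (List Int)) (n p x y : Nat) (hx : x ≤ n) (hy : y ≤ n) :
    PySem.List.pyGetD
      (PySem.List.pyGetD
        ((List.range (n + 1)).map (fun t => (List.range (n + 1)).map (rsP space p t))) (x : Int) [])
      (y : Int) 0 = rsP space p x y := by
  simp only [PySem.List.pyGetD_natCast]
  rw [getD_map_range2 (n + 1) x _ [] (by omega), getD_map_range2 (n + 1) y _ 0 (by omega)]

-- ===== VERDICT (by name: the statement is the Claim_ definition above) =====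
theorem mosa_spec : Claim_equal_mosa := by
  intro N M space _hD hPre
  unfold Spec_mosa
  rcases hPre with ⟨hM1, hMN, _, _⟩ | ⟨hM0, hNM⟩
  · -- main case: 1 ≤ M ≤ N
    obtain ⟨m, rfl⟩ := Int.eq_ofNat_of_zero_le (by omega : (0 : Int) ≤ M)
    obtain ⟨n, rfl⟩ := Int.eq_ofNat_of_zero_le (by omega : (0 : Int) ≤ N)
    have hmn : m ≤ n := by omega
    have hA : mosa (n : Int) (m : Int) space
        = (PySem.List.pyRange 0 ((n : Int) - (m : Int) + 1) 1).foldl (fun best i =>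
            (PySem.List.pyRange 0 ((n : Int) - (m : Int) + 1) 1).foldl (fun best j =>
              if winP space ((i.toNat + j.toNat + 1) % 2) i.toNat j.toNat m > best then
                winP space ((i.toNat + j.toNat + 1) % 2) i.toNat j.toNat m
              else best) best) 0 := by
      simp only [mosa]
      refine PySem.List.foldl_congr_mem _ _ _ _ ?_
      intro best i hi
      refine PySem.List.foldl_congr_mem _ _ _ _ ?_
      intro b j hj
      obtain ⟨iN, rfl⟩ := Int.eq_ofNat_of_zero_le ((PySem.List.mem_pyRange_one.mp hi).1)
      obtain ⟨jN, rfl⟩ := Int.eq_ofNat_of_zero_le ((PySem.List.mem_pyRange_one.mp hj).1)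
      simp only [Int.toNat_natCast]
      rw [catchA_eq space m iN jN]
    have hB : mosa_alt (n : Int) (m : Int) space
        = (PySem.List.pyRange 0 ((n : Int) - (m : Int) + 1) 1).foldl (fun best i =>
            (PySem.List.pyRange 0 ((n : Int) - (m : Int) + 1) 1).foldl (fun best j =>
              if winP space ((i.toNat + j.toNat + 1) % 2) i.toNat j.toNat m > best then
                winP space ((i.toNat + j.toNat + 1) % 2) i.toNat j.toNat m
              else best) best) 0 := by
      simp only [mosa_alt]
      rw [if_neg (by omega : ¬ ((m : Int) > (n : Int)))]
      rw [tables_eq space n]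
      simp only [tableSpec]
      refine PySem.List.foldl_congr_mem _ _ _ _ ?_
      intro best i hi
      refine PySem.List.foldl_congr_mem _ _ _ _ ?_
      intro b j hj
      have hi2 := (PySem.List.mem_pyRange_one.mp hi).2
      have hj2 := (PySem.List.mem_pyRange_one.mp hj).2
      obtain ⟨iN, rfl⟩ := Int.eq_ofNat_of_zero_le ((PySem.List.mem_pyRange_one.mp hi).1)
      obtain ⟨jN, rfl⟩ := Int.eq_ofNat_of_zero_le ((PySem.List.mem_pyRange_one.mp hj).1)
      have hxi : iN + m ≤ n := by omega
      have hxj : jN + m ≤ n := by omega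
      simp only [Int.toNat_natCast]
      rw [show ((iN : Int) + (m : Int)) = ((iN + m : Nat) : Int) by push_cast; ring,
        show ((jN : Int) + (m : Int)) = ((jN + m : Nat) : Int) by push_cast; ring]
      by_cases hp : (iN + jN) % 2 = 0
      · rw [if_pos ((parity_cast0 iN jN).mpr hp)]
        rw [lookup_eq space n 1 (iN + m) (jN + m) (by omega) (by omega),
          lookup_eq space n 1 iN (jN + m) (by omega) (by omega),
          lookup_eq space n 1 (iN + m) jN (by omega) (by omega),
          lookup_eq space n 1 iN jN (by omega) (by omega),
          win_eq space 1 iN jN m,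
          show (iN + jN + 1) % 2 = 1 by omega]
      · rw [if_neg (fun hc => hp ((parity_cast0 iN jN).mp hc))]
        rw [lookup_eq space n 0 (iN + m) (jN + m) (by omega) (by omega),
          lookup_eq space n 0 iN (jN + m) (by omega) (by omega),
          lookup_eq space n 0 (iN + m) jN (by omega) (by omega),
          lookup_eq space n 0 iN jN (by omega) (by omega),
          win_eq space 0 iN jN m,
          show (iN + jN + 1) % 2 = 0 by omega]
    rw [hA, hB]
  · -- trivial case: N < M, both loops never run
    have hnil : PySem.List.pyRange 0 (N - M + 1) 1 = [] :=
      PySem.List.pyRange_one_eq_nil (by omega)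
    simp only [mosa, mosa_alt, hnil, List.foldl_nil]
    rw [if_pos (by omega : M > N)]
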